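-- pv_equiv track=rewrite | github.com/jianwei76/SoliAudit | va/vul-predict/loc2linepos.py | loc_to_linepos
-- ===== SOURCE A (Python) =====
-- def loc_to_linepos(content, loc):
--     carrage = ord('\r')
--     newline = ord('\n')
--
--     line = 1
--     last_line_pos = 0
--     last_ch = None
--
--     for i in range(loc+1):
--         ch = content[i]
--
--         if byte_is_linebreak(ch):
--             last_line_pos = i
--
--         if ch == carrage or (ch == newline and last_ch != carrage):
--             line += 1
--
--         last_ch = ch
--
--     return line, loc - last_line_pos
--
-- def byte_is_linebreak(b):
--     return b == ord('\r') or b == ord('\n')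
-- ===== SOURCE B (Python) =====
-- def loc_to_linepos(content, loc):
--     cr = ord('\r')
--     nl = ord('\n')
--     end = loc + 1 if loc >= 0 else 0
--     data = content[:end]
--     crlf = sum(1 for a, b in zip(data, data[1:]) if a == cr and b == nl)
--     line = 1 + data.count(cr) + data.count(nl) - crlf
--     last = _rfind_linebreak(data)
--     return line, loc - last
--
--
-- def _rfind_linebreak(data):
--     for i in range(len(data) - 1, -1, -1):
--         if data[i] == 13 or data[i] == 10:
--             return i
--     return 0
-- ===== Notes on version B (the rewrite author's own statement) =====
-- stated objective: alternative
-- what changed: A's single stateful per-character loop (tracking line, last linebreak position and previous char) is replaced by aggregate passes over the prefix content[:loc+1]: line = 1 + count(CR) + count(LF) - count(CRLF pairs) and column from one backwards search for the last linebreak.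
import Mathlib
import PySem

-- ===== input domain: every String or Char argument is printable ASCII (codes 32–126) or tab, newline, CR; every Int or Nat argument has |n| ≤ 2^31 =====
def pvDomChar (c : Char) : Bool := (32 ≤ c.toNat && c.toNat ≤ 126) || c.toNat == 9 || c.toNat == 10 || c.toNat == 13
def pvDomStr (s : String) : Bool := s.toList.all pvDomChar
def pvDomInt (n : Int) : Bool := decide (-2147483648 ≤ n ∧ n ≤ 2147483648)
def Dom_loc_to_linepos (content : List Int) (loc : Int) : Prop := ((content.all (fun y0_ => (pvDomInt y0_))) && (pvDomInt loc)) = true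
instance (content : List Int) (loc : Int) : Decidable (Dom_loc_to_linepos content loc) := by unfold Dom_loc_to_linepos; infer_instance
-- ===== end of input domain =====

-- B replaces A's single stateful char-by-char loop with aggregate passes over the prefix:
-- line = 1 + #CR + #LF - #CRLF (counts), column via a backwards search for the last linebreak (objective: alternative).

-- ===== PORT A =====
def byte_is_linebreak (b : Int) : Bool := b == 13 || b == 10

def loc_to_linepos (content : List Int) (loc : Int) : Int × Int :=
  let r := (PySem.List.pyRange 0 (loc + 1) 1).foldl
    (fun (st : Int × Int × Option Int) i =>
      let ch := PySem.List.pyGetD content i 0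
      let lp := if byte_is_linebreak ch then i else st.2.1
      let ln := if ch == 13 || (ch == 10 && st.2.2 != some 13) then st.1 + 1 else st.1
      (ln, lp, some ch)) (1, 0, none)
  (r.1, loc - r.2.1)

-- ===== PORT B =====
def rfindLBAux : List Int → Int → Int
  | [], _ => 0
  | c :: rest, i => if c == 13 || c == 10 then i else rfindLBAux rest (i - 1)

def rfind_linebreak (data : List Int) : Int := rfindLBAux data.reverse ((data.length : Int) - 1)

def loc_to_linepos_alt (content : List Int) (loc : Int) : Int × Int :=
  let endIdx : Int := if loc ≥ 0 then loc + 1 else 0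
  let data := PySem.List.slice content none (some endIdx)
  let crlf : Int := ((data.zip data.tail).countP (fun p => p.1 == 13 && p.2 == 10) : Int)
  let line : Int := 1 + (data.count 13 : Int) + (data.count 10 : Int) - crlf
  (line, loc - rfind_linebreak data)

-- ===== PRECONDITION & SPEC =====
-- A raises IndexError exactly when 0 ≤ loc and loc ≥ len(content) (the loop reads content[loc]); Pre_ excludes exactly that.
def Pre_loc_to_linepos (content : List Int) (loc : Int) : Prop := loc < (content.length : Int)
instance (content : List Int) (loc : Int) : Decidable (Pre_loc_to_linepos content loc) := by unfold Pre_loc_to_linepos; infer_instance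
def pvWitness_loc_to_linepos : List Int × Int := ([104, 105, 10, 104], 3)

def Spec_loc_to_linepos (content : List Int) (loc : Int) (out : Int × Int) : Prop := out = loc_to_linepos_alt content loc
instance (content : List Int) (loc : Int) (out : Int × Int) : Decidable (Spec_loc_to_linepos content loc out) := by unfold Spec_loc_to_linepos; infer_instance

-- ===== CLAIM (what is proved, stated in full; the proofs are below) =====
def Claim_equal_loc_to_linepos : Prop := ∀ (content : List Int) (loc : Int), Dom_loc_to_linepos content loc → Pre_loc_to_linepos content loc → Spec_loc_to_linepos content loc (loc_to_linepos content loc)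

-- ===== LEMMAS AND PROOFS =====

-- the CRLF-pair count B's line formula subtracts
def crlfCount (d : List Int) : Nat := (d.zip d.tail).countP (fun p => p.1 == 13 && p.2 == 10)

theorem crlf_snoc (d : List Int) (x : Int) :
    crlfCount (d ++ [x]) = crlfCount d + (if d.getLast? = some 13 ∧ x = 10 then 1 else 0) := by
  induction d with
  | nil => simp [crlfCount]
  | cons y d ih =>
    cases d with
    | nil => simp [crlfCount]
    | cons z t =>
      have e1 : crlfCount (y :: z :: t ++ [x]) = (if y = 13 ∧ z = 10 then 1 else 0) + crlfCount (z :: t ++ [x]) := by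
        simp [crlfCount]; split_ifs <;> simp_all <;> omega
      have e2 : crlfCount (y :: z :: t) = (if y = 13 ∧ z = 10 then 1 else 0) + crlfCount (z :: t) := by
        simp [crlfCount]; split_ifs <;> simp_all <;> omega
      simp only [List.cons_append] at *
      rw [e1, ih, e2]; simp; omega

theorem rfind_snoc (d : List Int) (x : Int) :
    rfind_linebreak (d ++ [x]) =
      if byte_is_linebreak x then (d.length : Int) else rfind_linebreak d := by
  simp [rfind_linebreak, byte_is_linebreak, rfindLBAux]

-- A's loop over the first n characters computes exactly B's aggregates on take n content
theorem key (content : List Int) (n : Nat) (hn : n ≤ content.length) :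
    (PySem.List.pyRange 0 (n : Int) 1).foldl
      (fun (st : Int × Int × Option Int) i =>
        let ch := PySem.List.pyGetD content i 0
        let lp := if byte_is_linebreak ch then i else st.2.1
        let ln := if ch == 13 || (ch == 10 && st.2.2 != some 13) then st.1 + 1 else st.1
        (ln, lp, some ch)) (1, 0, none)
    = (1 + ((content.take n).count 13 : Int) + ((content.take n).count 10 : Int) - (crlfCount (content.take n) : Int),
       rfind_linebreak (content.take n),
       (content.take n).getLast?) := by
  induction n with
  | zero => simp [crlfCount, rfind_linebreak, rfindLBAux]
  | succ n ih =>
    have hlt : n < content.length := by omega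
    have hcast : ((n + 1 : Nat) : Int) = (n : Int) + 1 := by push_cast; ring
    rw [hcast, PySem.List.pyRange_one_succ_right (by positivity), List.foldl_append,
        ih (by omega)]
    have hget : content[n]?.toList = [content[n]] := by simp [hlt]
    have htake : content.take (n+1) = content.take n ++ [content[n]] := by
      rw [List.take_add_one, hget]
    have hlen : (content.take n).length = n := by simp [hlt.le]
    have hpg : PySem.List.pyGetD content (n : Int) 0 = content[n] := by
      simp [PySem.List.pyGetD_natCast, List.getD, hlt]
    simp only [List.foldl_cons, List.foldl_nil, hpg, htake, crlf_snoc, rfind_snoc,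
      List.count_append, List.getLast?_concat, hlen, List.count_singleton]
    set d := content.take n
    set x := content[n]
    by_cases h13 : d.getLast? = some 13 <;>
      by_cases hx13 : x = 13 <;> by_cases hx10 : x = 10 <;>
        simp [byte_is_linebreak, h13, hx13, hx10] <;> push_cast <;> ring

theorem main_eq (content : List Int) (loc : Int) (hpre : loc < (content.length : Int)) :
    loc_to_linepos content loc = loc_to_linepos_alt content loc := by
  simp only [loc_to_linepos, loc_to_linepos_alt]
  by_cases hneg : loc < 0
  · rw [PySem.List.pyRange_one_eq_nil (by omega), if_neg (by omega)]
    simp [PySem.List.slice_to, rfind_linebreak, rfindLBAux]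
  · have hn : loc.toNat + 1 ≤ content.length := by omega
    have hc : loc + 1 = ((loc.toNat + 1 : Nat) : Int) := by omega
    rw [hc, key content (loc.toNat + 1) hn, if_pos (by omega),
        PySem.List.slice_to (xs := content) (b := ((loc.toNat + 1 : Nat) : Int)) (by positivity)]
    have hmax : (max loc 0 + 1).toNat = loc.toNat + 1 := by omega
    simp [crlfCount, hmax]

-- ===== VERDICT (by name: the statement is the Claim_ definition above) =====
theorem loc_to_linepos_spec : Claim_equal_loc_to_linepos := by
  intro content loc _ hpre
  unfold Spec_loc_to_linepos
  exact main_eq content loc hpre
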